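-- pv_equiv track=rewrite | github.com/openshift-eng/ai-helpers | plugins/component-health/skills/list-regressions/list_regressions.py | group_by_component
-- ===== SOURCE A (Python) =====
-- def group_by_component(data: list) -> dict:
--     """
--     Group regressions by component name and split into open/closed.
--
--     Args:
--         data: List of regression dictionaries
--
--     Returns:
--         Dictionary mapping component names to objects containing open and closed regression lists
--     """
--     components = {}
--
--     for regression in data:
--         component = regression.get('component', 'Unknown')
--         if component not in components:
--             components[component] = {
--                 "open": [],
--                 "closed": []
--             }
--
--         # Split based on whether closed field is null
--         if regression.get('closed') is None:
--             components[component]["open"].append(regression)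
--         else:
--             components[component]["closed"].append(regression)
--
--     # Sort component names for consistent output
--     return dict(sorted(components.items()))
-- ===== SOURCE B (Python) =====
-- def group_by_component(data: list) -> dict:
--     """Sort once by component, then scan sorted runs; no final sort needed."""
--     def key(r):
--         return r.get('component', 'Unknown')
--
--     rows = sorted(data, key=key)
--     result = {}
--     i, n = 0, len(rows)
--     while i < n:
--         comp = key(rows[i])
--         j = i
--         while j < n and key(rows[j]) == comp:
--             j += 1
--         grp = rows[i:j]
--         result[comp] = {
--             "open": [r for r in grp if r.get('closed') is None],
--             "closed": [r for r in grp if r.get('closed') is not None],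
--         }
--         i = j
--     return result
-- ===== Notes on version B (the rewrite author's own statement) =====
-- stated objective: alternative
-- what changed: Instead of accumulating per-component open/closed lists in a dict during one pass and sorting the items afterwards, B sorts the input once by component key and then scans it run by run, partitioning each contiguous run into open/closed and inserting components in already-sorted order.
import Mathlib
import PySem

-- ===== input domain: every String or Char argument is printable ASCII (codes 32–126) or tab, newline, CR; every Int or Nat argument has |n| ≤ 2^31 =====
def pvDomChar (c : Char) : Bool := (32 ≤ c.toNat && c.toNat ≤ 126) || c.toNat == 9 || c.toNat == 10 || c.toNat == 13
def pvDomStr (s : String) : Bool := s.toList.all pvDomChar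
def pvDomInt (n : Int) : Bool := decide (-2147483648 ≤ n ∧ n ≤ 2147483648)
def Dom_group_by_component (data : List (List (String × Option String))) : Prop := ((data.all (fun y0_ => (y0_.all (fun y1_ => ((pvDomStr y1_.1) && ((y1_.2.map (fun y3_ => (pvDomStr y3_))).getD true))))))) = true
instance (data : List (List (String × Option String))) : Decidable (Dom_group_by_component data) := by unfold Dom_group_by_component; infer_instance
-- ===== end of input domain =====

-- B replaces A's dict-accumulate-then-sort by one stable sort on the component key followed
-- by a linear run scan (alternative decomposition, same cost); equal results on Pre_ (proved below).

-- ===== PORT A =====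
-- regression.get('component', 'Unknown'); the final .getD "" fires only when the stored value
-- is Python None, which Pre_group_by_component excludes.
def pvComp (reg : List (String × Option String)) : String :=
  (((PySem.Dict.mk reg).get? "component").getD (some "Unknown")).getD ""

-- regression.get('closed') is None
def pvIsOpen (reg : List (String × Option String)) : Bool :=
  (((PySem.Dict.mk reg).get? "closed").getD none).isNone

def group_by_component (data : List (List (String × Option String))) :
    List (String × List (String × List (List (String × Option String)))) :=
  let components : PySem.Dict String (PySem.Dict String (List (List (String × Option String)))) :=
    data.foldl (fun components regression =>
      let component := pvComp regression
      let components :=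
        if components.contains component then components
        else components.insert component (PySem.Dict.ofList [("open", []), ("closed", [])])
      if pvIsOpen regression then
        components.modify component PySem.Dict.empty (fun d => d.modify "open" [] (· ++ [regression]))
      else
        components.modify component PySem.Dict.empty (fun d => d.modify "closed" [] (· ++ [regression])))
      PySem.Dict.empty
  -- dict(sorted(components.items())): the tuples compare on their (distinct) first components
  (PySem.List.sorted components.items (fun p => p.1)).map (fun p => (p.1, p.2.items))

-- ===== PORT B =====
-- the outer while loop of Source B: each iteration consumes one run of equal component keys
def pvRuns : List (List (String × Option String)) →
    List (String × List (String × List (List (String × Option String))))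
  | [] => []
  | r :: rest =>
    let c := pvComp r
    let grp := r :: rest.takeWhile (fun x => pvComp x == c)
    (c, [("open", grp.filter (fun x => pvIsOpen x)),
         ("closed", grp.filter (fun x => !pvIsOpen x))])
      :: pvRuns (rest.dropWhile (fun x => pvComp x == c))
termination_by l => l.length
decreasing_by
  simp only [List.length_cons]
  exact Nat.lt_succ_of_le (List.length_dropWhile_le _ _)

def group_by_component_alt (data : List (List (String × Option String))) :
    List (String × List (String × List (List (String × Option String)))) :=
  pvRuns (PySem.List.sorted data pvComp)

-- ===== PRECONDITION & SPEC =====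
-- Pre_ excludes inputs where some regression stores Python None under 'component': there A
-- (and B alike) either raises TypeError (None is unorderable against str keys in the sort) or
-- returns a dict keyed by None, which is not a value of the declared String-keyed return type.
def Pre_group_by_component (data : List (List (String × Option String))) : Prop :=
  ∀ reg ∈ data, (PySem.Dict.mk reg).get? "component" ≠ some none
instance (data : List (List (String × Option String))) : Decidable (Pre_group_by_component data) := by
  unfold Pre_group_by_component; infer_instance

def pvWitness_group_by_component : (List (List (String × Option String))) :=
  [[("component", some "etcd"), ("closed", none)], [("closed", some "2024")],
   [("component", some "etcd"), ("closed", some "t")]]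

def Spec_group_by_component (data : List (List (String × Option String))) (out : List (String × List (String × List (List (String × Option String))))) : Prop := out = group_by_component_alt data
instance (data : List (List (String × Option String))) (out : List (String × List (String × List (List (String × Option String))))) : Decidable (Spec_group_by_component data out) := by
  unfold Spec_group_by_component
  letI h3 : DecidableEq (String × List (String × List (List (String × Option String)))) := instDecidableEqProd
  letI h4 : DecidableEq (List (String × List (String × List (List (String × Option String))))) := instDecidableEqList
  exact h4 out (group_by_component_alt data)

-- ===== CLAIM (what is proved, stated in full; the proofs are below) =====
def Claim_equal_group_by_component : Prop := ∀ (data : List (List (String × Option String))), Dom_group_by_component data → Pre_group_by_component data → Spec_group_by_component data (group_by_component data)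

-- ===== LEMMAS AND PROOFS =====

abbrev Reg : Type := List (String × Option String)

-- the inner {"open": o, "closed": k} dicts A maintains
def ocd (o k : List Reg) : PySem.Dict String (List Reg) :=
  PySem.Dict.ofList [("open", o), ("closed", k)]

def opensOf (data : List Reg) (c : String) : List Reg :=
  data.filter (fun r => pvComp r == c && pvIsOpen r)

def closedsOf (data : List Reg) (c : String) : List Reg :=
  data.filter (fun r => pvComp r == c && !pvIsOpen r)

-- both ports reduce to this canonical description
def canon (data : List Reg) : List (String × List (String × List Reg)) :=
  (PySem.List.sorted (PySem.Set.ofList (data.map pvComp)) (fun c => c)).map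
    (fun c => (c, [("open", opensOf data c), ("closed", closedsOf data c)]))

-- A's loop body, named so the fold lemmas can speak about it
def stepA (components : PySem.Dict String (PySem.Dict String (List Reg))) (regression : Reg) :
    PySem.Dict String (PySem.Dict String (List Reg)) :=
  let component := pvComp regression
  let components :=
    if components.contains component then components
    else components.insert component (PySem.Dict.ofList [("open", []), ("closed", [])])
  if pvIsOpen regression then
    components.modify component PySem.Dict.empty (fun d => d.modify "open" [] (· ++ [regression]))
  else
    components.modify component PySem.Dict.empty (fun d => d.modify "closed" [] (· ++ [regression]))

theorem group_by_component_eq_fold (data : List Reg) :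
    group_by_component data =
      (PySem.List.sorted (data.foldl stepA PySem.Dict.empty).items (fun p => p.1)).map
        (fun p => (p.1, p.2.items)) := rfl

theorem ocd_modify_open (o k : List Reg) (r : Reg) :
    (ocd o k).modify "open" [] (· ++ [r]) = ocd (o ++ [r]) k := rfl

theorem ocd_modify_closed (o k : List Reg) (r : Reg) :
    (ocd o k).modify "closed" [] (· ++ [r]) = ocd o (k ++ [r]) := rfl

theorem ocd_items (o k : List Reg) : (ocd o k).items = [("open", o), ("closed", k)] := rfl

theorem stepA_keys (d : PySem.Dict String (PySem.Dict String (List Reg))) (r : Reg) :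
    (stepA d r).keys = PySem.Set.add d.keys (pvComp r) := by
  unfold stepA
  by_cases hc : d.contains (pvComp r) = true
  · have hmem : pvComp r ∈ d.keys := (PySem.Dict.contains_iff_mem_keys d _).1 hc
    simp only [hc, if_true]
    split_ifs with ho <;>
      rw [PySem.Dict.keys_modify, PySem.Dict.keys_insert_of_contains _ _ hc] <;>
      simp [PySem.Set.add, PySem.Set.contains, hmem]
  · have hc' : d.contains (pvComp r) = false := by simpa using hc
    have hmem : pvComp r ∉ d.keys := fun h => by
      simp [(PySem.Dict.contains_iff_mem_keys d _).2 h] at hc'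
    simp only [hc', Bool.false_eq_true, if_false]
    split_ifs with ho <;>
      rw [PySem.Dict.keys_modify,
        PySem.Dict.keys_insert_of_contains _ _ (PySem.Dict.contains_insert_self d _ _),
        PySem.Dict.keys_insert_of_not_contains _ _ hc'] <;>
      simp [PySem.Set.add, PySem.Set.contains, hmem]

theorem stepA_contains_ne (d : PySem.Dict String (PySem.Dict String (List Reg))) (r : Reg)
    (c : String) (hc : pvComp r ≠ c) : (stepA d r).contains c = d.contains c := by
  unfold stepA
  have hbe : (c == pvComp r) = false := by simp [Ne.symm hc]
  by_cases hcon : d.contains (pvComp r) = true <;>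
    simp [hcon, PySem.Dict.contains_modify, PySem.Dict.contains_insert, hbe] <;>
    split_ifs <;>
    simp [PySem.Dict.contains_modify, PySem.Dict.contains_insert, hbe]

theorem stepA_getD_ne (d : PySem.Dict String (PySem.Dict String (List Reg))) (r : Reg)
    (c : String) (hc : pvComp r ≠ c) :
    (stepA d r).getD c PySem.Dict.empty = d.getD c PySem.Dict.empty := by
  unfold stepA
  have hne : c ≠ pvComp r := Ne.symm hc
  by_cases hcon : d.contains (pvComp r) = true <;>
    simp [hcon] <;>
    split_ifs <;>
    simp [PySem.Dict.getD_modify, PySem.Dict.getD_insert, hne]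

theorem stepA_contains_self (d : PySem.Dict String (PySem.Dict String (List Reg))) (r : Reg) :
    (stepA d r).contains (pvComp r) = true := by
  unfold stepA
  by_cases hcon : d.contains (pvComp r) = true <;>
    simp [hcon] <;>
    split_ifs <;>
    simp [PySem.Dict.contains_modify]

theorem stepA_getD_mem (d : PySem.Dict String (PySem.Dict String (List Reg))) (r : Reg)
    (o k : List Reg) (h : d.contains (pvComp r) = true)
    (hv : d.getD (pvComp r) PySem.Dict.empty = ocd o k) :
    (stepA d r).getD (pvComp r) PySem.Dict.empty =
      if pvIsOpen r then ocd (o ++ [r]) k else ocd o (k ++ [r]) := by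
  unfold stepA
  simp only [h, if_true]
  split_ifs with ho <;>
    rw [PySem.Dict.getD_modify_self, hv]
  · exact ocd_modify_open o k r
  · exact ocd_modify_closed o k r

theorem stepA_getD_new (d : PySem.Dict String (PySem.Dict String (List Reg))) (r : Reg)
    (h : d.contains (pvComp r) = false) :
    (stepA d r).getD (pvComp r) PySem.Dict.empty =
      if pvIsOpen r then ocd [r] [] else ocd [] [r] := by
  unfold stepA
  simp only [h, Bool.false_eq_true, if_false]
  split_ifs with ho <;>
    rw [PySem.Dict.getD_modify_self, PySem.Dict.getD_insert_self]
  · simpa using ocd_modify_open [] [] r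
  · simpa using ocd_modify_closed [] [] r

theorem foldA_getD_mem (data : List Reg) :
    ∀ (d : PySem.Dict String (PySem.Dict String (List Reg))) (c : String) (o k : List Reg),
      d.contains c = true → d.getD c PySem.Dict.empty = ocd o k →
      (data.foldl stepA d).getD c PySem.Dict.empty =
        ocd (o ++ opensOf data c) (k ++ closedsOf data c) := by
  induction data with
  | nil => intro d c o k h hv; simp [opensOf, closedsOf, hv]
  | cons r rest ih =>
    intro d c o k h hv
    rw [List.foldl_cons]
    by_cases hcr : pvComp r = c
    · subst hcr
      by_cases ho : pvIsOpen r = true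
      · have := stepA_getD_mem d r o k h hv
        rw [ho] at this; simp only [eq_self_iff_true, if_true] at this
        rw [ih _ _ _ _ (stepA_contains_self d r) this]
        simp [opensOf, closedsOf, ho, List.append_assoc]
      · have hof : pvIsOpen r = false := by simpa using ho
        have := stepA_getD_mem d r o k h hv
        rw [hof] at this; simp only [Bool.false_eq_true, if_false] at this
        rw [ih _ _ _ _ (stepA_contains_self d r) this]
        simp [opensOf, closedsOf, hof, List.append_assoc]
    · rw [ih _ _ _ _ (by rw [stepA_contains_ne d r c hcr]; exact h)
        (by rw [stepA_getD_ne d r c hcr]; exact hv)]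
      simp [opensOf, closedsOf, hcr]

theorem foldA_getD_new (data : List Reg) :
    ∀ (d : PySem.Dict String (PySem.Dict String (List Reg))) (c : String),
      d.contains c = false → c ∈ data.map pvComp →
      (data.foldl stepA d).getD c PySem.Dict.empty =
        ocd (opensOf data c) (closedsOf data c) := by
  induction data with
  | nil => intro d c _ hm; simp at hm
  | cons r rest ih =>
    intro d c h hm
    rw [List.foldl_cons]
    by_cases hcr : pvComp r = c
    · subst hcr
      by_cases ho : pvIsOpen r = true
      · have := stepA_getD_new d r h
        rw [ho] at this; simp only [eq_self_iff_true, if_true] at this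
        rw [foldA_getD_mem rest _ _ _ _ (stepA_contains_self d r) this]
        simp [opensOf, closedsOf, ho]
      · have hof : pvIsOpen r = false := by simpa using ho
        have := stepA_getD_new d r h
        rw [hof] at this; simp only [Bool.false_eq_true, if_false] at this
        rw [foldA_getD_mem rest _ _ _ _ (stepA_contains_self d r) this]
        simp [opensOf, closedsOf, hof]
    · have hm' : c ∈ rest.map pvComp := by
        rcases List.mem_map.1 hm with ⟨x, hx, hxc⟩
        rcases hx with _ | hx
        · exact absurd hxc hcr
        · exact List.mem_map.2 ⟨x, by assumption, hxc⟩
      rw [ih _ _ (by rw [stepA_contains_ne d r c hcr]; exact h) hm']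
      simp [opensOf, closedsOf, hcr]

theorem foldA_keys (data : List Reg) :
    ∀ (d : PySem.Dict String (PySem.Dict String (List Reg))),
      (data.foldl stepA d).keys = PySem.Set.update d.keys (data.map pvComp) := by
  induction data with
  | nil => intro d; simp [PySem.Set.update]
  | cons r rest ih =>
    intro d
    rw [List.foldl_cons, ih, stepA_keys]
    simp [PySem.Set.update]

theorem A_eq_canon (data : List Reg) : group_by_component data = canon data := by
  have hkeys : (data.foldl stepA PySem.Dict.empty).keys = PySem.Set.ofList (data.map pvComp) := by
    rw [foldA_keys, PySem.Set.ofList_eq_foldl]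
    simp [PySem.Set.update]
  have hnd : (data.foldl stepA PySem.Dict.empty).keys.Nodup := by
    rw [hkeys]; exact PySem.Set.nodup_ofList _
  have hitems := PySem.Dict.items_eq_map_keys _ hnd PySem.Dict.empty
  have hsorted : PySem.List.sorted (data.foldl stepA PySem.Dict.empty).items (fun p => p.1)
      = (PySem.List.sorted (PySem.Set.ofList (data.map pvComp)) (fun c => c)).map
          (fun c => (c, (data.foldl stepA PySem.Dict.empty).getD c PySem.Dict.empty)) := by
    apply PySem.List.sorted_eq_of_perm_of_pairwise_lt
    · rw [hitems, hkeys]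
      exact (PySem.List.sorted_perm _ _ _).map _
    · rw [List.pairwise_map]
      exact PySem.List.sorted_ofList_pairwise_lt _
  rw [group_by_component_eq_fold, hsorted, List.map_map, canon]
  apply List.map_congr_left
  intro c hc
  have hmem : c ∈ data.map pvComp := by
    rw [PySem.List.mem_sorted] at hc
    exact (PySem.Set.mem_ofList _ _).1 hc
  simp only [Function.comp]
  rw [foldA_getD_new data _ c (PySem.Dict.contains_empty _) hmem, ocd_items]

-- ===== B side =====

theorem filter_insertBy (c : String) (x : Reg) (acc : List Reg)
    (h : acc.Pairwise (fun a b => pvComp a ≤ pvComp b)) :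
    (PySem.List.insertBy (fun a b => decide (pvComp a < pvComp b)) x acc).filter
        (fun r => pvComp r == c)
      = if pvComp x == c then acc.filter (fun r => pvComp r == c) ++ [x]
        else acc.filter (fun r => pvComp r == c) := by
  induction acc with
  | nil =>
    by_cases hx : (pvComp x == c) = true <;>
      simp [PySem.List.insertBy, List.filter, hx]
  | cons a as ih =>
    rcases List.pairwise_cons.1 h with ⟨ha, htl⟩
    simp only [PySem.List.insertBy]
    by_cases hb : pvComp x < pvComp a
    · simp only [hb, decide_true, if_true]
      by_cases hx : (pvComp x == c) = true
      · have hcx : pvComp x = c := by simpa using hx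
        have hnil : (a :: as).filter (fun r => pvComp r == c) = [] := by
          rw [List.filter_eq_nil_iff]
          intro y hy
          have : pvComp a ≤ pvComp y := by
            rcases hy with _ | hy
            · exact le_refl _
            · exact ha y (by assumption)
          have : c < pvComp y := lt_of_lt_of_le (hcx ▸ hb) this
          simp [Ne.symm (ne_of_lt this)]
        simp [List.filter_cons, hx, hnil]
      · simp [List.filter_cons, hx]
    · simp only [hb, decide_false, Bool.false_eq_true, if_false]
      rw [List.filter_cons, ih htl]
      by_cases ha' : (pvComp a == c) = true <;>
        by_cases hx : (pvComp x == c) = true <;>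
        simp [ha', hx]

theorem filter_sorted (data : List Reg) (c : String) :
    (PySem.List.sorted data pvComp).filter (fun r => pvComp r == c)
      = data.filter (fun r => pvComp r == c) := by
  induction data using List.reverseRecOn with
  | nil => simp [PySem.List.sorted_eq_foldl_insertBy]
  | append_singleton xs x ih =>
    rw [PySem.List.sorted_eq_foldl_insertBy, List.foldl_append, List.foldl_cons, List.foldl_nil,
      ← PySem.List.sorted_eq_foldl_insertBy,
      filter_insertBy c x _ (PySem.List.sorted_pairwise xs pvComp), ih, List.filter_append]
    by_cases hx : (pvComp x == c) = true <;> simp [hx]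

theorem takeWhile_eq_filter (c : String) :
    ∀ (l : List Reg), l.Pairwise (fun a b => pvComp a ≤ pvComp b) →
      (∀ y ∈ l, c ≤ pvComp y) →
      l.takeWhile (fun y => pvComp y == c) = l.filter (fun y => pvComp y == c) := by
  intro l
  induction l with
  | nil => intro _ _; rfl
  | cons a as ih =>
    intro h hlo
    rcases List.pairwise_cons.1 h with ⟨ha, htl⟩
    by_cases hx : (pvComp a == c) = true
    · rw [List.takeWhile_cons_of_pos (p := fun y => pvComp y == c) hx,
        List.filter_cons_of_pos (p := fun y => pvComp y == c) hx,
        ih htl (fun y hy => le_trans (hlo a (by simp)) (ha y hy))]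
    · have hne : pvComp a ≠ c := fun he => hx (by simp [he])
      have hca : c < pvComp a := lt_of_le_of_ne (hlo a (by simp)) (Ne.symm hne)
      rw [List.takeWhile_cons_of_neg (p := fun y => pvComp y == c) (by simpa using hx),
        List.filter_cons_of_neg (p := fun y => pvComp y == c) (by simpa using hx)]
      symm
      rw [List.filter_eq_nil_iff]
      intro y hy
      have : c < pvComp y := lt_of_lt_of_le hca (ha y hy)
      simp [Ne.symm (ne_of_lt this)]

theorem gt_of_mem_dropWhile (c : String) :
    ∀ (l : List Reg), l.Pairwise (fun a b => pvComp a ≤ pvComp b) →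
      (∀ y ∈ l, c ≤ pvComp y) →
      ∀ x ∈ l.dropWhile (fun y => pvComp y == c), c < pvComp x := by
  intro l
  induction l with
  | nil => intro _ _ x hx; simp at hx
  | cons a as ih =>
    intro h hlo x hx
    rcases List.pairwise_cons.1 h with ⟨ha, htl⟩
    by_cases hpa : (pvComp a == c) = true
    · rw [List.dropWhile_cons_of_pos (p := fun y => pvComp y == c) hpa] at hx
      exact ih htl (fun y hy => le_trans (hlo a (by simp)) (ha y hy)) x hx
    · rw [List.dropWhile_cons_of_neg (p := fun y => pvComp y == c) (by simpa using hpa)] at hx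
      have hne : pvComp a ≠ c := fun he => hpa (by simp [he])
      have hca : c < pvComp a := lt_of_le_of_ne (hlo a (by simp)) (Ne.symm hne)
      rcases hx with _ | hx
      · exact hca
      · exact lt_of_lt_of_le hca (ha x (by assumption))

-- the component keys pvRuns emits, in order
def runKeys : List Reg → List String
  | [] => []
  | r :: rest => pvComp r :: runKeys (rest.dropWhile (fun x => pvComp x == pvComp r))
termination_by l => l.length
decreasing_by
  simp only [List.length_cons]
  exact Nat.lt_succ_of_le (List.length_dropWhile_le _ _)

theorem mem_map_of_mem_runKeys :
    ∀ (l : List Reg) (c : String), c ∈ runKeys l → c ∈ l.map pvComp := by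
  intro l
  induction l using runKeys.induct with
  | case1 => intro c hc; simp [runKeys] at hc
  | case2 r rest ih =>
    intro c hc
    rw [runKeys] at hc
    rcases hc with _ | hc
    · simp
    · rcases List.mem_map.1 (ih c (by assumption)) with ⟨x, hx, hxc⟩
      exact List.mem_map.2 ⟨x, List.mem_cons_of_mem r ((List.dropWhile_sublist _).mem hx), hxc⟩

theorem mem_runKeys_of_mem_map :
    ∀ (l : List Reg) (c : String), c ∈ l.map pvComp → c ∈ runKeys l := by
  intro l
  induction l using runKeys.induct with
  | case1 => intro c hc; simp at hc
  | case2 r rest ih =>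
    intro c hc
    rw [runKeys]
    rcases List.mem_map.1 hc with ⟨x, hx, hxc⟩
    cases hx with
    | head =>
      subst hxc
      exact List.mem_cons_self ..
    | tail _ hx =>
      have hsplit := List.takeWhile_append_dropWhile
        (p := fun x => pvComp x == pvComp r) (l := rest)
      rw [← hsplit] at hx
      rcases List.mem_append.1 hx with hx | hx
      · have h1 := List.mem_takeWhile_imp hx
        have h2 : pvComp x = pvComp r := by simpa using h1
        have h3 : c = pvComp r := by rw [← hxc, h2]
        exact h3 ▸ List.mem_cons_self ..
      · exact List.mem_cons_of_mem _ (ih c (List.mem_map.2 ⟨x, hx, hxc⟩))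

theorem runKeys_pairwise_lt :
    ∀ (l : List Reg), l.Pairwise (fun a b => pvComp a ≤ pvComp b) →
      (runKeys l).Pairwise (· < ·) := by
  intro l
  induction l using runKeys.induct with
  | case1 => intro _; simp [runKeys]
  | case2 r rest ih =>
    intro h
    rcases List.pairwise_cons.1 h with ⟨ha, htl⟩
    rw [runKeys]
    refine List.pairwise_cons.2 ⟨?_, ih (htl.sublist (List.dropWhile_sublist _))⟩
    intro c' hc'
    rcases List.mem_map.1 (mem_map_of_mem_runKeys _ c' hc') with ⟨x, hx, hxc⟩
    exact hxc ▸ gt_of_mem_dropWhile (pvComp r) rest htl ha x hx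

theorem pvRuns_eq_map :
    ∀ (l : List Reg), l.Pairwise (fun a b => pvComp a ≤ pvComp b) →
      pvRuns l = (runKeys l).map
        (fun c => (c, [("open", opensOf l c), ("closed", closedsOf l c)])) := by
  intro l
  induction l using pvRuns.induct with
  | case1 => intro _; simp [pvRuns, runKeys]
  | case2 r rest hcdef ih =>
    intro h
    rcases List.pairwise_cons.1 h with ⟨ha, htl⟩
    rw [pvRuns, runKeys]
    simp only [List.map_cons, List.cons.injEq]
    have htake := takeWhile_eq_filter (pvComp r) rest htl ha
    have hgrp : r :: rest.takeWhile (fun x => pvComp x == pvComp r)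
        = (r :: rest).filter (fun x => pvComp x == pvComp r) := by
      rw [htake, List.filter_cons_of_pos (by simp)]
    have hfilters : ∀ (c' : String) (p : Reg → Bool),
        ((r :: rest).filter (fun x => pvComp x == c')).filter p
          = (r :: rest).filter (fun x => pvComp x == c' && p x) := by
      intro c' p
      rw [List.filter_filter]
      exact List.filter_congr (fun x _ => by rw [Bool.and_comm])
    have htail : ∀ c' ∈ runKeys (rest.dropWhile (fun x => pvComp x == pvComp r)),
        ∀ (p : Reg → Bool),
        (rest.dropWhile (fun x => pvComp x == pvComp r)).filter (fun x => pvComp x == c' && p x)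
          = (r :: rest).filter (fun x => pvComp x == c' && p x) := by
      intro c' hc' p
      rcases List.mem_map.1 (mem_map_of_mem_runKeys _ c' hc') with ⟨x, hx, hxc⟩
      have hlt : pvComp r < c' := hxc ▸ gt_of_mem_dropWhile (pvComp r) rest htl ha x hx
      have hne : pvComp r ≠ c' := ne_of_lt hlt
      have hnil : (rest.takeWhile (fun x => pvComp x == pvComp r)).filter
          (fun x => pvComp x == c' && p x) = [] := by
        rw [List.filter_eq_nil_iff]
        intro y hy
        have : pvComp y = pvComp r := by simpa using List.mem_takeWhile_imp hy
        simp [this, hne]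
      rw [List.filter_cons_of_neg (by simp [hne])]
      conv_rhs => rw [← List.takeWhile_append_dropWhile (p := fun x => pvComp x == pvComp r) (l := rest)]
      rw [List.filter_append, hnil, List.nil_append]
    refine ⟨?_, ?_⟩
    · -- head pair
      refine congrArg _ ?_
      simp only [hgrp]
      rw [hfilters, hfilters]
      rfl
    · rw [ih (htl.sublist (List.dropWhile_sublist _))]
      apply List.map_congr_left
      intro c' hc'
      simp only [opensOf, closedsOf]
      rw [htail c' hc', htail c' hc']

theorem runKeys_sorted (data : List Reg) :
    PySem.List.sorted (PySem.Set.ofList (data.map pvComp)) (fun c => c)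
      = runKeys (PySem.List.sorted data pvComp) := by
  have hpl := runKeys_pairwise_lt _ (PySem.List.sorted_pairwise data pvComp)
  apply PySem.List.sorted_eq_of_perm_of_pairwise_lt
  · refine (List.perm_ext_iff_of_nodup (hpl.imp ne_of_lt) (PySem.Set.nodup_ofList _)).2 ?_
    intro c
    constructor
    · intro hc
      rcases List.mem_map.1 (mem_map_of_mem_runKeys _ c hc) with ⟨x, hx, hxc⟩
      exact (PySem.Set.mem_ofList _ _).2
        (List.mem_map.2 ⟨x, (PySem.List.sorted_perm data pvComp false).mem_iff.1 hx, hxc⟩)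
    · intro hc
      rcases List.mem_map.1 ((PySem.Set.mem_ofList _ _).1 hc) with ⟨x, hx, hxc⟩
      exact mem_runKeys_of_mem_map _ c
        (List.mem_map.2 ⟨x, (PySem.List.sorted_perm data pvComp false).mem_iff.2 hx, hxc⟩)
  · exact hpl

theorem filterp_sorted (data : List Reg) (c : String) (p : Reg → Bool) :
    (PySem.List.sorted data pvComp).filter (fun r => pvComp r == c && p r)
      = data.filter (fun r => pvComp r == c && p r) := by
  have hsplit : ∀ m : List Reg, m.filter (fun r => pvComp r == c && p r)
      = (m.filter (fun r => pvComp r == c)).filter p := by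
    intro m
    rw [List.filter_filter]
    exact (List.filter_congr fun x _ => by rw [Bool.and_comm]).symm
  rw [hsplit, hsplit, filter_sorted]

theorem B_eq_canon (data : List Reg) : group_by_component_alt data = canon data := by
  unfold group_by_component_alt canon
  rw [pvRuns_eq_map _ (PySem.List.sorted_pairwise data pvComp), ← runKeys_sorted data]
  exact List.map_congr_left fun c _ => by
    simp only [opensOf, closedsOf, filterp_sorted]

theorem group_by_component_eq_alt (data : List (List (String × Option String))) :
    group_by_component data = group_by_component_alt data := by
  rw [A_eq_canon, B_eq_canon]

-- ===== VERDICT (by name: the statement is the Claim_ definition above) =====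
theorem group_by_component_spec : Claim_equal_group_by_component := by
  intro data _ _
  unfold Spec_group_by_component
  exact group_by_component_eq_alt data
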